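-- pv_equiv track=rewrite | github.com/HelloKindGit/Code-Advent-2023 | day_21/part2/day_21_2.py | calculate_additional_paths
-- ===== SOURCE A (Python) =====
-- def calculate_additional_paths(d, value, step_limit, row_count, cache):
--     if (d, value, step_limit) in cache:
--         return cache[(d, value, step_limit)]
--
--     amount = (step_limit - d) // row_count
--     result = 0
--     for x in range(1, amount + 1):
--         if d + row_count * x <= step_limit and (d + row_count * x) % 2 == (step_limit % 2):
--             result += (x + 1) if value == 2 else 1
--
--     cache[(d, value, step_limit)] = result
--     return result
-- ===== SOURCE B (Python) =====
-- def calculate_additional_paths(d, value, step_limit, row_count, cache):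
--     key = (d, value, step_limit)
--     if key in cache:
--         return cache[key]
--     span = step_limit - d
--     amount = span // row_count
--     if amount < 1:
--         result = 0
--     elif row_count < 0:
--         # bound d + row_count*x <= step_limit only reachable at x == amount, exactly when it is an exact division
--         result = (amount + 1 if value == 2 else 1) if span % row_count == 0 else 0
--     elif row_count % 2 == 0:
--         if span % 2 == 0:
--             result = amount * (amount + 3) // 2 if value == 2 else amount
--         else:
--             result = 0
--     else:
--         if span % 2 == 0:
--             k = amount // 2              # matching x are the even 2,4,...,2k
--             result = k * (k + 2) if value == 2 else k
--         else:
--             k = (amount + 1) // 2        # matching x are the odd 1,3,...,2k-1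
--             result = k * (k + 1) if value == 2 else k
--     cache[key] = result
--     return result
-- ===== Notes on version B (the rewrite author's own statement) =====
-- stated objective: alternative
-- what changed: A counts/sums the matching steps with a loop over range(1, amount+1); B computes the same result in closed form by a case analysis on the sign and parity of row_count and the parity of step_limit - d (arithmetic-series formulas, and the single-candidate case for negative row_count).
import Mathlib
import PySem

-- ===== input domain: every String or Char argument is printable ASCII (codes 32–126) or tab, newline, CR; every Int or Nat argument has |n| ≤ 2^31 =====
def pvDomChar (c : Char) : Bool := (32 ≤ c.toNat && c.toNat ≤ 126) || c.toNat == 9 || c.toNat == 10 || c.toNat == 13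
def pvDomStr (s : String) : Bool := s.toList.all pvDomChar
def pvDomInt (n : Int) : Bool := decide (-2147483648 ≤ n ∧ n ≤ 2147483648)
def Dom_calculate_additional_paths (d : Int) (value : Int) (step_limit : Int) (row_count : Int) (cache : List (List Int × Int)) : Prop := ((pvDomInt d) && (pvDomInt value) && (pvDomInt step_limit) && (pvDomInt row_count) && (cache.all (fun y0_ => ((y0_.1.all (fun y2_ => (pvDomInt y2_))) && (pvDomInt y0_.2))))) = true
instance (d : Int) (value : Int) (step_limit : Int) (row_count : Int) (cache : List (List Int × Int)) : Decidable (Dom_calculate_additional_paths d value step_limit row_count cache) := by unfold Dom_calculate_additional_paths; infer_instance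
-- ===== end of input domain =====

-- B replaces A's counting loop by a closed-form case analysis (arithmetic-series formulas per parity
-- of row_count and of step_limit - d); equivalence is about the RETURN value only (both Pythons also
-- write the result into the mutable cache, identically).

-- ===== PORT A =====
def calculate_additional_paths (d : Int) (value : Int) (step_limit : Int) (row_count : Int) (cache : List (List Int × Int)) : Int :=
  match (PySem.Dict.mk cache).get? [d, value, step_limit] with
  | some v => v
  | none =>
      let amount := PySem.Int.floordiv (step_limit - d) row_count
      (PySem.List.pyRange 1 (amount + 1) 1).foldl
        (fun result x =>
          if d + row_count * x ≤ step_limit ∧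
             PySem.Int.mod (d + row_count * x) 2 = PySem.Int.mod step_limit 2 then
            result + (if value = 2 then x + 1 else 1)
          else result) 0

-- ===== PORT B =====
def calculate_additional_paths_alt (d : Int) (value : Int) (step_limit : Int) (row_count : Int) (cache : List (List Int × Int)) : Int :=
  match (PySem.Dict.mk cache).get? [d, value, step_limit] with
  | some v => v
  | none =>
      let span := step_limit - d
      let amount := PySem.Int.floordiv span row_count
      if amount < 1 then 0
      else if row_count < 0 then
        if PySem.Int.mod span row_count = 0 then (if value = 2 then amount + 1 else 1) else 0
      else if PySem.Int.mod row_count 2 = 0 then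
        if PySem.Int.mod span 2 = 0 then
          (if value = 2 then PySem.Int.floordiv (amount * (amount + 3)) 2 else amount)
        else 0
      else
        if PySem.Int.mod span 2 = 0 then
          let k := PySem.Int.floordiv amount 2
          if value = 2 then k * (k + 2) else k
        else
          let k := PySem.Int.floordiv (amount + 1) 2
          if value = 2 then k * (k + 1) else k

-- ===== PRECONDITION & SPEC =====
-- Pre_ excludes only row_count = 0 when the key is absent from the cache: there Python A raises ZeroDivisionError.
def Pre_calculate_additional_paths (d : Int) (value : Int) (step_limit : Int) (row_count : Int) (cache : List (List Int × Int)) : Prop :=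
  ((PySem.Dict.mk cache).get? [d, value, step_limit]).isSome = true ∨ row_count ≠ 0
instance (d : Int) (value : Int) (step_limit : Int) (row_count : Int) (cache : List (List Int × Int)) : Decidable (Pre_calculate_additional_paths d value step_limit row_count cache) := by unfold Pre_calculate_additional_paths; infer_instance
def pvWitness_calculate_additional_paths : Int × Int × Int × Int × (List (List Int × Int)) := (0, 2, 11, 3, [])

def Spec_calculate_additional_paths (d : Int) (value : Int) (step_limit : Int) (row_count : Int) (cache : List (List Int × Int)) (out : Int) : Prop := out = calculate_additional_paths_alt d value step_limit row_count cache
instance (d : Int) (value : Int) (step_limit : Int) (row_count : Int) (cache : List (List Int × Int)) (out : Int) : Decidable (Spec_calculate_additional_paths d value step_limit row_count cache out) := by unfold Spec_calculate_additional_paths; infer_instance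

-- ===== CLAIM (what is proved, stated in full; the proofs are below) =====
def Claim_equal_calculate_additional_paths : Prop := ∀ (d : Int) (value : Int) (step_limit : Int) (row_count : Int) (cache : List (List Int × Int)), Dom_calculate_additional_paths d value step_limit row_count cache → Pre_calculate_additional_paths d value step_limit row_count cache → Spec_calculate_additional_paths d value step_limit row_count cache (calculate_additional_paths d value step_limit row_count cache)

-- ===== LEMMAS AND PROOFS =====

-- the full range [1..n]: its (x+1)-sum, doubled
theorem pv_sum_all (n : Nat) :
    ((PySem.List.pyRange 1 ((n : Int) + 1) 1).map (fun x => x + 1)).sum * 2 = (n : Int) * ((n : Int) + 3) := by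
  induction n with
  | zero => simp [PySem.List.pyRange_one_eq_nil]
  | succ k ih =>
      have h : PySem.List.pyRange 1 ((k : Int) + 1 + 1) 1 = PySem.List.pyRange 1 ((k : Int) + 1) 1 ++ [(k : Int) + 1] :=
        PySem.List.pyRange_one_succ_right (by omega)
      push_cast
      rw [h, List.map_append, List.sum_append]
      push_cast at ih
      simp only [List.map_cons, List.map_nil, List.sum_cons, List.sum_nil]
      linear_combination ih

-- the elements of [1..n] of a given parity p: how many (= a), and their (x+1)-sum
theorem pv_parity_stats (p : Nat) (hp : p = 0 ∨ p = 1) : ∀ (n a : Nat), (n + p) / 2 = a →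
    (((PySem.List.pyRange 1 ((n : Int) + 1) 1).filter (fun x => decide (x % 2 = (p : Int)))).length = a) ∧
    ((((PySem.List.pyRange 1 ((n : Int) + 1) 1).filter (fun x => decide (x % 2 = (p : Int)))).map (fun x => x + 1)).sum
      = (a : Int) * ((a : Int) + 2 - p)) := by
  intro n
  induction n with
  | zero =>
      intro a ha
      have ha0 : a = 0 := by omega
      subst ha0
      constructor <;> simp [PySem.List.pyRange_one_eq_nil]
  | succ k ih =>
      intro a ha
      have h : PySem.List.pyRange 1 ((k : Int) + 1 + 1) 1 = PySem.List.pyRange 1 ((k : Int) + 1) 1 ++ [(k : Int) + 1] :=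
        PySem.List.pyRange_one_succ_right (by omega)
      have hcast : ((k + 1 : Nat) : Int) + 1 = (k : Int) + 1 + 1 := by push_cast; ring
      rw [hcast, h, List.filter_append]
      obtain ⟨ih1, ih2⟩ := ih ((k + p) / 2) rfl
      by_cases hm : ((k : Int) + 1) % 2 = (p : Int)
      · have hfs : List.filter (fun x => decide (x % 2 = (p : Int))) [(k : Int) + 1] = [(k : Int) + 1] := by
          rw [List.filter_cons_of_pos (by simpa using hm), List.filter_nil]
        have hstep : a = (k + p) / 2 + 1 := by rcases hp with h0 | h0 <;> (subst h0; omega)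
        have hval : (k : Int) + 1 = 2 * (((k + p) / 2 : Nat) : Int) + 2 - p := by
          rcases hp with h0 | h0 <;> (subst h0; omega)
        constructor
        · rw [List.length_append, hfs, ih1]; simp [hstep]
        · rw [List.map_append, List.sum_append, hfs, ih2]
          simp only [List.map_cons, List.map_nil, List.sum_cons, List.sum_nil]
          rw [hval, hstep]
          push_cast
          ring
      · have hfs : List.filter (fun x => decide (x % 2 = (p : Int))) [(k : Int) + 1] = [] := by
          rw [List.filter_cons_of_neg (by simpa using hm), List.filter_nil]
        have hstep : a = (k + p) / 2 := by rcases hp with h0 | h0 <;> (subst h0; omega)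
        subst hstep
        constructor
        · rw [List.length_append, hfs, ih1]; simp
        · rw [List.map_append, List.sum_append, hfs, ih2]; simp

-- the loop of A, reduced to a mapped sum over a filtered range
theorem pv_loop_eq (d value step_limit row_count : Int) :
    (PySem.List.pyRange 1 (PySem.Int.floordiv (step_limit - d) row_count + 1) 1).foldl
        (fun result x =>
          if d + row_count * x ≤ step_limit ∧
             PySem.Int.mod (d + row_count * x) 2 = PySem.Int.mod step_limit 2 then
            result + (if value = 2 then x + 1 else 1)
          else result) 0
    = (((PySem.List.pyRange 1 (PySem.Int.floordiv (step_limit - d) row_count + 1) 1).filter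
          (fun x => decide (d + row_count * x ≤ step_limit ∧
             PySem.Int.mod (d + row_count * x) 2 = PySem.Int.mod step_limit 2))).map
        (fun x => if value = 2 then x + 1 else 1)).sum := by
  rw [PySem.List.foldl_ite_eq_foldl_filter
        (fun x => d + row_count * x ≤ step_limit ∧
             PySem.Int.mod (d + row_count * x) 2 = PySem.Int.mod step_limit 2)
        (fun acc x => acc + (if value = 2 then x + 1 else 1)),
      PySem.List.foldl_add]
  ring

theorem pv_core (d value step_limit row_count : Int) (hr : row_count ≠ 0) :
    (((PySem.List.pyRange 1 (PySem.Int.floordiv (step_limit - d) row_count + 1) 1).filter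
          (fun x => decide (d + row_count * x ≤ step_limit ∧
             PySem.Int.mod (d + row_count * x) 2 = PySem.Int.mod step_limit 2))).map
        (fun x => if value = 2 then x + 1 else 1)).sum
    = (let span := step_limit - d
       let amount := PySem.Int.floordiv span row_count
       if amount < 1 then 0
       else if row_count < 0 then
         if PySem.Int.mod span row_count = 0 then (if value = 2 then amount + 1 else 1) else 0
       else if PySem.Int.mod row_count 2 = 0 then
         if PySem.Int.mod span 2 = 0 then
           (if value = 2 then PySem.Int.floordiv (amount * (amount + 3)) 2 else amount)
         else 0
       else
         if PySem.Int.mod span 2 = 0 then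
           let k := PySem.Int.floordiv amount 2
           if value = 2 then k * (k + 2) else k
         else
           let k := PySem.Int.floordiv (amount + 1) 2
           if value = 2 then k * (k + 1) else k) := by
  simp only []
  set span := step_limit - d with hspan
  set amount := PySem.Int.floordiv span row_count with hamount
  have hid : amount * row_count + PySem.Int.mod span row_count = span :=
    PySem.Int.floordiv_mul_add_mod span row_count
  by_cases ha : amount < 1
  · rw [if_pos ha, PySem.List.pyRange_one_eq_nil (by omega)]
    simp
  · rw [if_neg ha]
    have h1 : 1 ≤ amount := by omega
    have hrange : PySem.List.pyRange 1 (amount + 1) 1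
        = PySem.List.pyRange 1 amount 1 ++ [amount] := PySem.List.pyRange_one_succ_right h1
    by_cases hneg : row_count < 0
    · -- negative step: only x = amount can satisfy the bound, iff the division is exact
      rw [if_pos hneg]
      have hmb : row_count < PySem.Int.mod span row_count ∧ PySem.Int.mod span row_count ≤ 0 := by
        have h2 : PySem.Int.mod span row_count = -(PySem.Int.mod (-span) (-row_count)) := by
          have h := PySem.Int.mod_neg_neg (-span) (-row_count)
          rw [neg_neg, neg_neg] at h
          exact h
        have h3 : PySem.Int.mod (-span) (-row_count) = (-span) % (-row_count) :=
          PySem.Int.mod_eq_emod_of_pos (by omega)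
        have h4 : 0 ≤ (-span) % (-row_count) := Int.emod_nonneg _ (by omega)
        have h5 : (-span) % (-row_count) < -row_count := Int.emod_lt_of_pos _ (by omega)
        omega
      have hfirst : (PySem.List.pyRange 1 amount 1).filter
          (fun x => decide (d + row_count * x ≤ step_limit ∧
             PySem.Int.mod (d + row_count * x) 2 = PySem.Int.mod step_limit 2)) = [] := by
        rw [List.filter_eq_nil_iff]
        intro x hx
        rw [PySem.List.mem_pyRange_one] at hx
        simp only [decide_eq_true_eq, not_and]
        intro hle
        exfalso
        have hmul : row_count * (amount - 1) ≤ row_count * x :=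
          mul_le_mul_of_nonpos_left (by omega) (by omega)
        nlinarith [hid, hmb.1, hmb.2]
      rw [hrange, List.filter_append, hfirst, List.nil_append]
      by_cases hm0 : PySem.Int.mod span row_count = 0
      · rw [if_pos hm0]
        have heq : d + row_count * amount = step_limit := by
          have hc : row_count * amount = amount * row_count := mul_comm _ _
          omega
        have hP : (d + row_count * amount ≤ step_limit ∧
             PySem.Int.mod (d + row_count * amount) 2 = PySem.Int.mod step_limit 2) := by
          constructor
          · omega
          · rw [heq]
        rw [List.filter_cons_of_pos (by simpa using hP), List.filter_nil]
        simp
      · rw [if_neg hm0]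
        have hP : ¬ (d + row_count * amount ≤ step_limit ∧
             PySem.Int.mod (d + row_count * amount) 2 = PySem.Int.mod step_limit 2) := by
          intro hP
          have hc : row_count * amount = amount * row_count := mul_comm _ _
          omega
        rw [List.filter_cons_of_neg (by simpa using hP), List.filter_nil]
        simp
    · -- positive step: the bound always holds on the range; only parity filters
      rw [if_neg hneg]
      have hpos : 0 < row_count := by omega
      have hmb : 0 ≤ PySem.Int.mod span row_count ∧ PySem.Int.mod span row_count < row_count := by
        have h3 : PySem.Int.mod span row_count = span % row_count :=
          PySem.Int.mod_eq_emod_of_pos hpos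
        have h4 : 0 ≤ span % row_count := Int.emod_nonneg _ (by omega)
        have h5 : span % row_count < row_count := Int.emod_lt_of_pos _ hpos
        omega
      have hbound : ∀ x ∈ PySem.List.pyRange 1 (amount + 1) 1, d + row_count * x ≤ step_limit := by
        intro x hx
        rw [PySem.List.mem_pyRange_one] at hx
        have hmul : row_count * x ≤ row_count * amount :=
          mul_le_mul_of_nonneg_left (by omega) (by omega)
        nlinarith [hid, hmb.1]
      have hm2 : ∀ y : Int, PySem.Int.mod y 2 = y % 2 := fun y =>
        PySem.Int.mod_eq_emod_of_pos (by norm_num)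
      have hrc2 : PySem.Int.mod row_count 2 = row_count % 2 := hm2 _
      have hsp2 : PySem.Int.mod span 2 = span % 2 := hm2 _
      set n := amount.toNat with hn
      have hna : (n : Int) = amount := by omega
      by_cases hev : row_count % 2 = 0
      · -- even row_count: parity of d + row_count*x is that of d
        rw [if_pos (by omega : PySem.Int.mod row_count 2 = 0)]
        obtain ⟨t, ht⟩ : ∃ t, row_count = 2 * t := ⟨row_count / 2, by omega⟩
        have hparx : ∀ x : Int, (d + row_count * x) % 2 = d % 2 := by
          intro x
          have : row_count * x = 2 * (t * x) := by rw [ht]; ring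
          rw [this]
          omega
        by_cases hpar : d % 2 = step_limit % 2
        · rw [if_pos (by omega : PySem.Int.mod span 2 = 0)]
          have hfull : (PySem.List.pyRange 1 (amount + 1) 1).filter
              (fun x => decide (d + row_count * x ≤ step_limit ∧
                 PySem.Int.mod (d + row_count * x) 2 = PySem.Int.mod step_limit 2))
              = PySem.List.pyRange 1 (amount + 1) 1 := by
            rw [List.filter_eq_self]
            intro x hx
            simp only [decide_eq_true_eq]
            exact ⟨hbound x hx, by rw [hm2, hm2, hparx x, hpar]⟩
          rw [hfull]
          by_cases hv : value = 2
          · simp only [if_pos hv]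
            have hS := pv_sum_all n
            rw [hna] at hS
            symm
            rw [PySem.Int.floordiv_eq_iff_of_pos (by norm_num : (0 : Int) < 2)]
            constructor <;> linarith [hS]
          · simp only [if_neg hv]
            rw [PySem.List.sum_map_const_int, PySem.List.length_pyRange_one]
            omega
        · rw [if_neg (by omega : ¬ PySem.Int.mod span 2 = 0)]
          have hnil : (PySem.List.pyRange 1 (amount + 1) 1).filter
              (fun x => decide (d + row_count * x ≤ step_limit ∧
                 PySem.Int.mod (d + row_count * x) 2 = PySem.Int.mod step_limit 2)) = [] := by
            rw [List.filter_eq_nil_iff]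
            intro x hx
            simp only [decide_eq_true_eq, not_and]
            intro _
            rw [hm2, hm2, hparx x]
            omega
          rw [hnil]
          simp
      · -- odd row_count: parity of d + row_count*x is that of d + x
        rw [if_neg (by omega : ¬ PySem.Int.mod row_count 2 = 0)]
        obtain ⟨t, ht⟩ : ∃ t, row_count = 2 * t + 1 := ⟨row_count / 2, by omega⟩
        have hparx : ∀ x : Int, (d + row_count * x) % 2 = (d + x) % 2 := by
          intro x
          have : row_count * x = x + 2 * (t * x) := by rw [ht]; ring
          rw [this]
          omega
        have hfc : (PySem.List.pyRange 1 (amount + 1) 1).filter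
            (fun x => decide (d + row_count * x ≤ step_limit ∧
               PySem.Int.mod (d + row_count * x) 2 = PySem.Int.mod step_limit 2))
            = (PySem.List.pyRange 1 (amount + 1) 1).filter
            (fun x => decide (x % 2 = span % 2)) := by
          apply List.filter_congr
          intro x hx
          simp only [decide_eq_decide]
          constructor
          · rintro ⟨-, hp⟩
            rw [hm2, hm2, hparx x] at hp
            omega
          · intro hp
            refine ⟨hbound x hx, ?_⟩
            rw [hm2, hm2, hparx x]
            omega
        rw [hfc]
        by_cases hsp : span % 2 = 0
        · rw [if_pos (by omega : PySem.Int.mod span 2 = 0)]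
          have hk : PySem.Int.floordiv amount 2 = ((n / 2 : Nat) : Int) := by
            rw [← hna]
            exact_mod_cast PySem.Int.floordiv_natCast n 2
          obtain ⟨hlen, hsum⟩ := pv_parity_stats 0 (Or.inl rfl) n ((n + 0) / 2) rfl
          rw [hna] at hlen hsum
          simp only [Nat.cast_zero, sub_zero, Nat.add_zero] at hlen hsum
          simp only [hsp]
          by_cases hv : value = 2
          · simp only [if_pos hv]
            rw [hsum, hk]
          · simp only [if_neg hv]
            rw [PySem.List.sum_map_const_int, hlen, hk]
            ring
        · rw [if_neg (by omega : ¬ PySem.Int.mod span 2 = 0)]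
          have hsp1 : span % 2 = 1 := by omega
          have hk : PySem.Int.floordiv (amount + 1) 2 = (((n + 1) / 2 : Nat) : Int) := by
            rw [← hna]
            calc PySem.Int.floordiv ((n : Int) + 1) 2
                = PySem.Int.floordiv ((n + 1 : Nat) : Int) ((2 : Nat) : Int) := by push_cast; ring_nf
              _ = (((n + 1) / 2 : Nat) : Int) := PySem.Int.floordiv_natCast (n + 1) 2
          obtain ⟨hlen, hsum⟩ := pv_parity_stats 1 (Or.inr rfl) n ((n + 1) / 2) rfl
          rw [hna] at hlen hsum
          simp only [Nat.cast_one] at hlen hsum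
          simp only [hsp1]
          by_cases hv : value = 2
          · simp only [if_pos hv]
            rw [hsum, hk]
            push_cast
            ring
          · simp only [if_neg hv]
            rw [PySem.List.sum_map_const_int, hlen, hk]
            ring

theorem calculate_additional_paths_spec : Claim_equal_calculate_additional_paths := by
  intro d value step_limit row_count cache _ hpre
  unfold Spec_calculate_additional_paths calculate_additional_paths calculate_additional_paths_alt
  cases hget : (PySem.Dict.mk cache).get? [d, value, step_limit] with
  | some v => rfl
  | none =>
      have hr : row_count ≠ 0 := by
        rcases hpre with h | h
        · rw [hget] at h; simp at h
        · exact h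
      simp only []
      exact (pv_loop_eq d value step_limit row_count).trans (pv_core d value step_limit row_count hr)
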